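-- pv_equiv track=rewrite | github.com/projetmbc-tools/for-dev | justcode/tools/factory/config/license/build_01_update_online.py | tagfrom
-- ===== SOURCE A (Python) =====
-- def tagfrom(shortid):
--     tag = ''
--
--     for c in shortid:
--         if c in '. -':
--             tag += '_'
--
--         else:
--             tag += c.upper()
--
--     return tag
-- ===== SOURCE B (Python) =====
-- _TABLE = str.maketrans('. -', '___')
--
--
-- def tagfrom(shortid):
--     return shortid.upper().translate(_TABLE)
-- ===== Notes on version B (the rewrite author's own statement) =====
-- stated objective: idiomatic
-- what changed: Replaced the per-character loop with its if/else branch and string accumulator by two whole-string passes: upper() on the whole string, then a translation table (str.maketrans) mapping the three separator characters (dot, space, hyphen) to underscore.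
import Mathlib
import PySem

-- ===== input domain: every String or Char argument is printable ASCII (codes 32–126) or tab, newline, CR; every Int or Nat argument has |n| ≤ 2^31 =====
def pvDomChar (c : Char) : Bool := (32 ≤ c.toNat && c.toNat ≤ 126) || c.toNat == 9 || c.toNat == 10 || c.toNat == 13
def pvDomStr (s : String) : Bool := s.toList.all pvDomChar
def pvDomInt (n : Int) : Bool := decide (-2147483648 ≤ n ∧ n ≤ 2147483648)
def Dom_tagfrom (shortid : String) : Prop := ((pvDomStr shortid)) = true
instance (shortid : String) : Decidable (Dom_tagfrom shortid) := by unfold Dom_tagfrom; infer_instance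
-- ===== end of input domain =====

-- B replaces A's per-character loop and if/else branch with two whole-string passes:
-- upper() over the string, then a translation table mapping the three separator
-- characters (dot, space, hyphen) to underscore (idiomatic; timed faster by a constant factor).


-- ===== PORT A =====
-- for c in shortid: tag += '_' if c in '. -' else c.upper()
def tagfrom (shortid : String) : String :=
  shortid.toList.foldl
    (fun tag c =>
      if PySem.Str.isIn (String.ofList [c]) ". -" then tag ++ "_"
      else tag ++ String.ofList [PySem.Chars.upperChar c])
    ""

-- ===== PORT B =====
-- str.maketrans('. -', '___') : a translation table, a char→char dict
def pvTable : PySem.Dict Char Char :=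
  (List.zip ". -".toList "___".toList).foldl
    (fun d p => d.insert p.1 p.2) (PySem.Dict.mk [])

-- shortid.upper().translate(_TABLE): translate maps each char through the table, identity if absent
def tagfrom_alt (shortid : String) : String :=
  String.ofList ((PySem.Str.upper shortid).toList.map (fun c => pvTable.getD c c))

-- ===== PRECONDITION & SPEC =====
def Spec_tagfrom (shortid : String) (out : String) : Prop := out = tagfrom_alt shortid
instance (shortid : String) (out : String) : Decidable (Spec_tagfrom shortid out) := by unfold Spec_tagfrom; infer_instance

-- ===== CLAIM (what is proved, stated in full; the proofs are below) =====
def Claim_equal_tagfrom : Prop := ∀ (shortid : String), Dom_tagfrom shortid → Spec_tagfrom shortid (tagfrom shortid)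

-- ===== LEMMAS AND PROOFS =====

-- A's branch on each character, as a char→char function
def pvStepA (c : Char) : Char :=
  if PySem.Str.isIn (String.ofList [c]) ". -" then '_' else PySem.Chars.upperChar c

lemma pvIsIn_sep (c : Char) :
    PySem.Str.isIn (String.ofList [c]) ". -" = (c == '.' || c == ' ' || c == '-') := by
  have h : PySem.Str.isIn (String.ofList [c]) ". -" = true ↔
      (c == '.' || c == ' ' || c == '-') = true := by
    simp only [PySem.Str.isIn_eq, String.toList_ofList]
    rw [PySem.Chars.isIn_iff_infix]
    show [c] <:+: ['.', ' ', '-'] ↔ _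
    rw [List.singleton_infix_iff]
    simp [or_assoc]
  by_cases hb : (c == '.' || c == ' ' || c == '-') = true
  · rw [hb, h.mpr hb]
  · rw [Bool.eq_false_iff.mpr hb,
      Bool.eq_false_iff.mpr (fun hh => hb (h.mp hh))]

-- the table lookup is the identity away from the three separators
lemma pvTable_getD_of_ne (d : Char) (h1 : d ≠ '.') (h2 : d ≠ ' ') (h3 : d ≠ '-') :
    pvTable.getD d d = d := by
  show (PySem.Dict.mk [('.', '_'), (' ', '_'), ('-', '_')]).getD d d = d
  have e1 : ('.' == d) = false := beq_eq_false_iff_ne.mpr (Ne.symm h1)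
  have e2 : (' ' == d) = false := beq_eq_false_iff_ne.mpr (Ne.symm h2)
  have e3 : ('-' == d) = false := beq_eq_false_iff_ne.mpr (Ne.symm h3)
  simp [PySem.Dict.getD, PySem.Dict.get?, List.find?, e1, e2, e3]

-- the pointwise agreement: translating the uppercased char equals A's branch
lemma pvPointwise (c : Char) :
    pvTable.getD (PySem.Chars.upperChar c) (PySem.Chars.upperChar c) = pvStepA c := by
  unfold pvStepA
  rw [pvIsIn_sep]
  by_cases hsep : (c == '.' || c == ' ' || c == '-') = true
  · rcases Bool.or_eq_true_iff.mp hsep with h | h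
    · rcases Bool.or_eq_true_iff.mp h with h' | h'
      · rw [eq_of_beq h']; decide
      · rw [eq_of_beq h']; decide
    · rw [eq_of_beq h]; decide
  · have hns := hsep
    simp only [Bool.or_eq_true_iff, beq_iff_eq, not_or] at hns
    rw [if_neg hsep]
    unfold PySem.Chars.upperChar
    by_cases hl : PySem.Chars.islower c = true
    · rw [if_pos hl]
      have hc : 'a' ≤ c ∧ c ≤ 'z' := by
        unfold PySem.Chars.islower at hl; simpa using hl
      have h97 : 97 ≤ c.toNat := hc.1
      have h122 : c.toNat ≤ 122 := hc.2
      have hval : (c.toNat - 32).isValidChar := Or.inl (by omega)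
      have htn : (Char.ofNat (c.toNat - 32)).toNat = c.toNat - 32 := by
        rw [Char.toNat_ofNat, if_pos hval]
      have hne : ∀ d : Char, d.toNat ∈ ([46, 32, 45] : List Nat) →
          Char.ofNat (c.toNat - 32) ≠ d := by
        intro d hd heq
        have := congrArg Char.toNat heq
        rw [htn] at this
        simp at hd
        omega
      exact pvTable_getD_of_ne _ (hne '.' (by decide)) (hne ' ' (by decide))
        (hne '-' (by decide))
    · rw [if_neg hl]
      exact pvTable_getD_of_ne _ hns.1.1 hns.1.2 hns.2

-- A's foldl builds the map of pvStepA over the characters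
lemma pvFoldA (l : List Char) (acc : String) :
    l.foldl
      (fun tag c =>
        if PySem.Str.isIn (String.ofList [c]) ". -" then tag ++ "_"
        else tag ++ String.ofList [PySem.Chars.upperChar c])
      acc = acc ++ String.ofList (l.map pvStepA) := by
  induction l generalizing acc with
  | nil => apply String.ext; simp
  | cons c cs ih =>
    simp only [List.foldl, List.map]
    rw [ih]
    unfold pvStepA
    by_cases h : PySem.Str.isIn (String.ofList [c]) ". -" = true
    · rw [if_pos h, if_pos h]
      apply String.ext; simp
    · rw [if_neg h, if_neg h]
      apply String.ext; simp

-- ===== VERDICT (by name: the statement is the Claim_ definition above) =====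
theorem tagfrom_spec : Claim_equal_tagfrom := by
  intro shortid _
  show tagfrom shortid = tagfrom_alt shortid
  unfold tagfrom tagfrom_alt
  rw [pvFoldA, PySem.Str.toList_upper]
  unfold PySem.Chars.upper
  rw [List.map_map]
  have heq : ((fun c => pvTable.getD c c) ∘ PySem.Chars.upperChar) = pvStepA := by
    funext c; exact pvPointwise c
  rw [heq]
  apply String.ext; simp
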